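-- pv_equiv track=rewrite | github.com/ZhuoQiuMcgill/stanza-ROM | src/pos_analysis.py | _analyze_pos_pairs
-- ===== SOURCE A (Python) =====
-- from typing import List, Tuple, Dict, Any
-- from collections import defaultdict
--
-- def _analyze_pos_pairs(pos_ud_tuples: List[Tuple], pos_rom_tuples: List[Tuple]) -> Dict:
--     """
--     Analyze POS pairs and their associated UD and ROM relations.
--
--     Args:
--         pos_ud_tuples: List of (POS1, POS2, UD_relation) tuples
--         pos_rom_tuples: List of (POS1, POS2, ROM_relation) tuples
--
--     Returns:
--         Dictionary with POS pair analysis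
--     """
--     analysis = defaultdict(lambda: {'ud_relations': defaultdict(int), 'rom_relations': defaultdict(int)})
--
--     # Count UD relations by POS pair
--     for pos1, pos2, ud_rel in pos_ud_tuples:
--         pos_pair = (pos1, pos2)
--         analysis[pos_pair]['ud_relations'][ud_rel] += 1
--
--     # Count ROM relations by POS pair
--     for pos1, pos2, rom_rel in pos_rom_tuples:
--         pos_pair = (pos1, pos2)
--         analysis[pos_pair]['rom_relations'][rom_rel] += 1
--
--     return dict(analysis)
-- ===== SOURCE B (Python) =====
-- from collections import defaultdict, Counter
--
-- def _analyze_pos_pairs(pos_ud_tuples, pos_rom_tuples):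
--     # Flat counts keyed by ((pos1, pos2), relation), one pass per list.
--     cnt_ud = Counter(((p1, p2), rel) for p1, p2, rel in pos_ud_tuples)
--     cnt_rom = Counter(((p1, p2), rel) for p1, p2, rel in pos_rom_tuples)
--     # POS pairs in first-appearance order (UD list first, then ROM list).
--     pairs = dict.fromkeys([key[0] for key in cnt_ud] + [key[0] for key in cnt_rom])
--
--     def side(cnt, pair):
--         d = defaultdict(int)
--         for (p, rel), n in cnt.items():
--             if p == pair:
--                 d[rel] = n
--         return d
--
--     return {pair: {'ud_relations': side(cnt_ud, pair),
--                    'rom_relations': side(cnt_rom, pair)}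
--             for pair in pairs}
-- ===== Notes on version B (the rewrite author's own statement) =====
-- stated objective: alternative
-- what changed: Replaces A's single nested defaultdict(lambda: {'ud_relations': defaultdict(int), 'rom_relations': defaultdict(int)}) mutated in place with two flat Counters keyed by ((pos1,pos2), relation), a deduplicated pair list, and a final per-pair assembly of the nested result.
import Mathlib
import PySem

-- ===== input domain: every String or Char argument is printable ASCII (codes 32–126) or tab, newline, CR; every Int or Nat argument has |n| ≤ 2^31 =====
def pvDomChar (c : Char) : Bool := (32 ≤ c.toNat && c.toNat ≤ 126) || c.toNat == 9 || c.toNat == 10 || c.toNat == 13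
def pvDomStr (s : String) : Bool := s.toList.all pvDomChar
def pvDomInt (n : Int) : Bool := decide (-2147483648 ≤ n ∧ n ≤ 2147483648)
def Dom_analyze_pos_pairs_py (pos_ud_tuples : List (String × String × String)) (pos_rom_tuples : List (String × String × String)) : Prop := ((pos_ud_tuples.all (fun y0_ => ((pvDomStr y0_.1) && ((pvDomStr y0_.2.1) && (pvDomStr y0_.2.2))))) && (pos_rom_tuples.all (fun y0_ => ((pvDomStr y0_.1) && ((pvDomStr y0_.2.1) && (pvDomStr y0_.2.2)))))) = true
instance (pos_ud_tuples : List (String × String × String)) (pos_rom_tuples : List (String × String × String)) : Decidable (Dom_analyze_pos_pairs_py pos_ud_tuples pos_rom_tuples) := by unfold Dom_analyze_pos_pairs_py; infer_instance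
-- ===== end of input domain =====

-- B replaces A's nested defaultdict-of-defaultdicts mutation with two flat Counters keyed by
-- ((pos1,pos2), relation) and a final per-pair assembly; same cost, different structure.

-- ===== PORT A =====
-- A: one defaultdict keyed by (pos1,pos2) whose value holds the two inner relation-count dicts,
-- updated in place while scanning the UD list then the ROM list; the value dict
-- {'ud_relations': …, 'rom_relations': …} is rendered as its (label, items) list.
def analyze_pos_pairs_py (pos_ud_tuples : List (String × String × String)) (pos_rom_tuples : List (String × String × String)) : List (String × String × List (String × List (String × Int))) :=
  let analysis0 : PySem.Dict (String × String) (PySem.Dict String Int × PySem.Dict String Int) :=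
    pos_ud_tuples.foldl (fun d t =>
      d.modify (t.1, t.2.1) (PySem.Dict.empty, PySem.Dict.empty)
        (fun v => (v.1.modify t.2.2 0 (· + 1), v.2))) PySem.Dict.empty
  let analysis :=
    pos_rom_tuples.foldl (fun d t =>
      d.modify (t.1, t.2.1) (PySem.Dict.empty, PySem.Dict.empty)
        (fun v => (v.1, v.2.modify t.2.2 0 (· + 1)))) analysis0
  analysis.items.map (fun kv =>
    (kv.1.1, kv.1.2, [("ud_relations", kv.2.1.items), ("rom_relations", kv.2.2.items)]))

-- ===== PORT B =====
-- B: flat Counters on the composite key, pair order = first appearance (UD list then ROM list),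
-- then each side's inner dict is read off the flat counter by filtering on the pair.
def analyze_pos_pairs_py_alt (pos_ud_tuples : List (String × String × String)) (pos_rom_tuples : List (String × String × String)) : List (String × String × List (String × List (String × Int))) :=
  let cu := PySem.Dict.counter (pos_ud_tuples.map (fun t => (((t.1, t.2.1) : String × String), t.2.2)))
  let cr := PySem.Dict.counter (pos_rom_tuples.map (fun t => (((t.1, t.2.1) : String × String), t.2.2)))
  let pairs := PySem.Set.ofList (cu.keys.map (·.1) ++ cr.keys.map (·.1))
  pairs.map (fun pr => (pr.1, pr.2,
    [("ud_relations", (cu.items.filter (fun kv => kv.1.1 == pr)).map (fun kv => (kv.1.2, kv.2))),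
     ("rom_relations", (cr.items.filter (fun kv => kv.1.1 == pr)).map (fun kv => (kv.1.2, kv.2)))]))

-- ===== PRECONDITION & SPEC =====
def Spec_analyze_pos_pairs_py (pos_ud_tuples : List (String × String × String)) (pos_rom_tuples : List (String × String × String)) (out : List (String × String × List (String × List (String × Int)))) : Prop := out = analyze_pos_pairs_py_alt pos_ud_tuples pos_rom_tuples
instance (pos_ud_tuples : List (String × String × String)) (pos_rom_tuples : List (String × String × String)) (out : List (String × String × List (String × List (String × Int)))) : Decidable (Spec_analyze_pos_pairs_py pos_ud_tuples pos_rom_tuples out) := by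
  unfold Spec_analyze_pos_pairs_py
  haveI : DecidableEq (String × String × List (String × List (String × Int))) := instDecidableEqProd
  infer_instance

-- ===== CLAIM (what is proved, stated in full; the proofs are below) =====
def Claim_equal_analyze_pos_pairs_py : Prop := ∀ (pos_ud_tuples : List (String × String × String)) (pos_rom_tuples : List (String × String × String)), Dom_analyze_pos_pairs_py pos_ud_tuples pos_rom_tuples → Spec_analyze_pos_pairs_py pos_ud_tuples pos_rom_tuples (analyze_pos_pairs_py pos_ud_tuples pos_rom_tuples)

-- ===== LEMMAS AND PROOFS =====

-- dedup commutes with filter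
theorem ofList_filter {α : Type} [BEq α] [LawfulBEq α] (p : α → Bool) (l : List α) :
    PySem.Set.ofList (l.filter p) = (PySem.Set.ofList l).filter p := by
  induction l using List.reverseRecOn with
  | nil => rfl
  | append_singleton xs x ih =>
    rw [List.filter_append, PySem.Set.ofList_append_singleton, PySem.Set.add_eq_ite]
    by_cases hp : p x = true
    · rw [show List.filter p [x] = [x] by simp [hp], PySem.Set.ofList_append_singleton,
        PySem.Set.add_eq_ite, ih]
      by_cases hm : x ∈ PySem.Set.ofList xs
      · have hmx : x ∈ (PySem.Set.ofList xs).filter p := List.mem_filter.mpr ⟨hm, hp⟩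
        simp [hm, hmx]
      · have hmx : x ∉ (PySem.Set.ofList xs).filter p := fun h => hm (List.mem_filter.mp h).1
        simp [hm, hmx, List.filter_append, hp]
    · rw [show List.filter p [x] = [] by simp [hp], List.append_nil, ih]
      by_cases hm : x ∈ PySem.Set.ofList xs
      · simp [hm]
      · simp [hm, List.filter_append, hp]

-- updating with a deduplicated list is updating with the list (through a map)
theorem update_ofList_map {α β : Type} [BEq α] [LawfulBEq α] [BEq β] [LawfulBEq β]
    (f : α → β) (s : PySem.Set β) (xs : List α) :
    PySem.Set.update s ((PySem.Set.ofList xs).map f) = PySem.Set.update s (xs.map f) := by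
  induction xs using List.reverseRecOn generalizing s with
  | nil => rfl
  | append_singleton xs x ih =>
    have hsingle : ∀ (t : PySem.Set β) (y : β), PySem.Set.update t [y] = PySem.Set.add t y := by
      intro t y; rfl
    rw [PySem.Set.ofList_append_singleton, List.map_append,
      show List.map f [x] = [f x] from rfl, PySem.Set.update_append, hsingle]
    by_cases hm : x ∈ PySem.Set.ofList xs
    · have hfx : f x ∈ PySem.Set.update s (xs.map f) := by
        rw [PySem.Set.mem_update]
        exact Or.inr (List.mem_map_of_mem ((PySem.Set.mem_ofList xs x).mp hm))
      rw [PySem.Set.add_of_mem hm, ih, PySem.Set.add_of_mem hfx]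
    · rw [PySem.Set.add_of_not_mem hm, List.map_append, show List.map f [x] = [f x] from rfl, PySem.Set.update_append, ih, hsingle]

-- dedup commutes with an injective map
theorem ofList_map_inj {α β : Type} [BEq α] [LawfulBEq α] [BEq β] [LawfulBEq β]
    (g : α → β) (hg : Function.Injective g) (l : List α) :
    PySem.Set.ofList (l.map g) = (PySem.Set.ofList l).map g := by
  induction l using List.reverseRecOn with
  | nil => rfl
  | append_singleton xs x ih =>
    rw [List.map_append, show List.map g [x] = [g x] from rfl,
      PySem.Set.ofList_append_singleton, PySem.Set.ofList_append_singleton,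
      PySem.Set.add_eq_ite, PySem.Set.add_eq_ite, ih]
    by_cases hm : x ∈ PySem.Set.ofList xs
    · have hgm : g x ∈ (PySem.Set.ofList xs).map g := List.mem_map_of_mem hm
      simp [hm, hgm]
    · have hgm : g x ∉ (PySem.Set.ofList xs).map g := by
        intro h
        obtain ⟨y, hy, hgy⟩ := List.mem_map.mp h
        exact hm (hg hgy ▸ hy)
      simp [hm, hgm, List.map_append]

-- a list of pairs with constant first component is the map of its second components
theorem eq_map_snd {β γ : Type} (pr : β) (l : List (β × γ)) (h : ∀ x ∈ l, x.1 = pr) :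
    l = (l.map (·.2)).map (fun r => (pr, r)) := by
  induction l with
  | nil => rfl
  | cons x xs ih =>
    simp only [List.map_cons]
    have hx := h x (List.mem_cons_self)
    refine congrArg₂ List.cons ?_ (ih (fun y hy => h y (List.mem_cons_of_mem _ hy)))
    exact Prod.ext (by simp [hx]) rfl

-- reading A's UD-counting loop back at one pair
theorem getD_fold_ud (l : List (String × String × String))
    (d : PySem.Dict (String × String) (PySem.Dict String Int × PySem.Dict String Int))
    (c : String × String) :
    ((l.foldl (fun d t =>
        d.modify (t.1, t.2.1) (PySem.Dict.empty, PySem.Dict.empty)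
          (fun v => (v.1.modify t.2.2 0 (· + 1), v.2))) d).getD c
        (PySem.Dict.empty, PySem.Dict.empty)) =
      (((l.filter (fun t => ((t.1, t.2.1) : String × String) == c)).foldl
          (fun a t => a.modify t.2.2 0 (· + 1))
          (d.getD c (PySem.Dict.empty, PySem.Dict.empty)).1),
        (d.getD c (PySem.Dict.empty, PySem.Dict.empty)).2) := by
  induction l generalizing d with
  | nil => rfl
  | cons t l ih =>
    rw [List.foldl_cons, ih, List.filter_cons]
    by_cases h : ((t.1, t.2.1) : String × String) = c
    · have hb : (((t.1, t.2.1) : String × String) == c) = true := by simp [h]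
      rw [hb, if_pos rfl, List.foldl_cons, PySem.Dict.getD_modify, if_pos h.symm, h]
    · have hb : (((t.1, t.2.1) : String × String) == c) = false := by simp [h]
      rw [hb, if_neg (by simp), PySem.Dict.getD_modify, if_neg (fun hc => h hc.symm)]

-- reading A's ROM-counting loop back at one pair
theorem getD_fold_rom (l : List (String × String × String))
    (d : PySem.Dict (String × String) (PySem.Dict String Int × PySem.Dict String Int))
    (c : String × String) :
    ((l.foldl (fun d t =>
        d.modify (t.1, t.2.1) (PySem.Dict.empty, PySem.Dict.empty)
          (fun v => (v.1, v.2.modify t.2.2 0 (· + 1)))) d).getD c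
        (PySem.Dict.empty, PySem.Dict.empty)) =
      ((d.getD c (PySem.Dict.empty, PySem.Dict.empty)).1,
        ((l.filter (fun t => ((t.1, t.2.1) : String × String) == c)).foldl
          (fun a t => a.modify t.2.2 0 (· + 1))
          (d.getD c (PySem.Dict.empty, PySem.Dict.empty)).2)) := by
  induction l generalizing d with
  | nil => rfl
  | cons t l ih =>
    rw [List.foldl_cons, ih, List.filter_cons]
    by_cases h : ((t.1, t.2.1) : String × String) = c
    · have hb : (((t.1, t.2.1) : String × String) == c) = true := by simp [h]
      rw [hb, if_pos rfl, List.foldl_cons, PySem.Dict.getD_modify, if_pos h.symm, h]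
    · have hb : (((t.1, t.2.1) : String × String) == c) = false := by simp [h]
      rw [hb, if_neg (by simp), PySem.Dict.getD_modify, if_neg (fun hc => h hc.symm)]

-- one side of one pair's entry: A's in-place counting dict equals B's filtered flat counter
theorem side_items_eq (xs : List (String × String × String)) (pr : String × String) :
    ((xs.filter (fun t => ((t.1, t.2.1) : String × String) == pr)).foldl
        (fun a t => a.modify t.2.2 0 (· + 1))
        (PySem.Dict.empty : PySem.Dict String Int)).items =
      ((PySem.Dict.counter (xs.map (fun t => (((t.1, t.2.1) : String × String), t.2.2)))).items.filter
          (fun kv => kv.1.1 == pr)).map (fun kv => (kv.1.2, kv.2)) := by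
  set U := xs.map (fun t => (((t.1, t.2.1) : String × String), t.2.2)) with hU
  set W := U.filter (fun kv => kv.1 == pr) with hW
  set V := W.map (·.2) with hV
  have hWfst : ∀ kv ∈ W, kv.1 = pr := by
    intro kv hkv
    rw [hW] at hkv
    exact eq_of_beq (List.mem_filter.mp hkv).2
  have hinj : Function.Injective (fun r : String => ((pr, r) : (String × String) × String)) := by
    intro a b h; exact (Prod.ext_iff.mp h).2
  have hWV : W = V.map (fun r => (pr, r)) := eq_map_snd pr W hWfst
  -- the left side is the counter of V
  have hL : (xs.filter (fun t => ((t.1, t.2.1) : String × String) == pr)).foldl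
      (fun a t => a.modify t.2.2 0 (· + 1)) (PySem.Dict.empty : PySem.Dict String Int) =
      PySem.Dict.counter V := by
    rw [PySem.Dict.counter_eq_foldl, hV, List.foldl_map, hW, hU, List.filter_map, List.foldl_map]
    rfl
  rw [hL, PySem.Dict.items_counter, PySem.Dict.items_counter, List.filter_map, List.map_map]
  have hfilt : List.filter ((fun kv => kv.1.1 == pr) ∘ fun k => (k, (U.count k : Int)))
      (PySem.Set.ofList U) = (PySem.Set.ofList U).filter (fun kv => kv.1 == pr) := by
    apply List.filter_congr; intro x _; rfl
  rw [hfilt, ← ofList_filter, ← hW, hWV, ofList_map_inj _ hinj, List.map_map]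
  apply List.map_congr_left
  intro r hr
  have hcount : U.count (pr, r) = V.count r := by
    have h1 : U.count (pr, r) = W.count (pr, r) := by
      rw [hW]; exact (List.count_filter (by simp)).symm
    have h2 : W.count (pr, r) = V.count r := by
      rw [hWV]; exact List.count_map_of_injective V _ hinj r
    rw [h1, h2]
  simp only [Function.comp]
  exact Prod.ext rfl (by rw [hcount])

-- the keys of A's analysis dict are B's pair list
theorem keys_eq (ud rom : List (String × String × String)) :
    ((rom.foldl (fun d t =>
        d.modify (t.1, t.2.1) (PySem.Dict.empty, PySem.Dict.empty)
          (fun v => (v.1, v.2.modify t.2.2 0 (· + 1))))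
      (ud.foldl (fun d t =>
        d.modify (t.1, t.2.1) (PySem.Dict.empty, PySem.Dict.empty)
          (fun v => (v.1.modify t.2.2 0 (· + 1), v.2)))
        (PySem.Dict.empty : PySem.Dict (String × String) (PySem.Dict String Int × PySem.Dict String Int)))).keys) =
    PySem.Set.ofList
      ((PySem.Dict.counter (ud.map (fun t => (((t.1, t.2.1) : String × String), t.2.2)))).keys.map (·.1) ++
       (PySem.Dict.counter (rom.map (fun t => (((t.1, t.2.1) : String × String), t.2.2)))).keys.map (·.1)) := by
  rw [PySem.Dict.keys_foldl_modify_key rom (fun t => ((t.1, t.2.1) : String × String))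
        (PySem.Dict.empty, PySem.Dict.empty) (fun _ t v => (v.1, v.2.modify t.2.2 0 (· + 1))),
      PySem.Dict.keys_foldl_modify_key ud (fun t => ((t.1, t.2.1) : String × String))
        (PySem.Dict.empty, PySem.Dict.empty) (fun _ t v => (v.1.modify t.2.2 0 (· + 1), v.2)),
      PySem.Dict.keys_empty]
  rw [PySem.Dict.keys_counter, PySem.Dict.keys_counter, PySem.Set.ofList_append,
      ← PySem.Set.update_empty ((PySem.Set.ofList (ud.map (fun t => (((t.1, t.2.1) : String × String), t.2.2)))).map (·.1)),
      update_ofList_map, update_ofList_map]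
  rw [List.map_map, List.map_map]
  rfl

-- ===== VERDICT (by name: the statement is the Claim_ definition above) =====
theorem analyze_pos_pairs_py_spec : Claim_equal_analyze_pos_pairs_py := by
  intro ud rom _
  unfold Spec_analyze_pos_pairs_py analyze_pos_pairs_py analyze_pos_pairs_py_alt
  simp only []
  have hnd : ((rom.foldl (fun d t =>
        d.modify (t.1, t.2.1) (PySem.Dict.empty, PySem.Dict.empty)
          (fun v => (v.1, v.2.modify t.2.2 0 (· + 1))))
      (ud.foldl (fun d t =>
        d.modify (t.1, t.2.1) (PySem.Dict.empty, PySem.Dict.empty)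
          (fun v => (v.1.modify t.2.2 0 (· + 1), v.2)))
        (PySem.Dict.empty : PySem.Dict (String × String) (PySem.Dict String Int × PySem.Dict String Int)))).keys).Nodup :=
    PySem.Dict.nodup_keys_foldl_modify_key rom _ _ _ _
      (PySem.Dict.nodup_keys_foldl_modify_key ud _ _ _ _ PySem.Dict.nodup_keys_empty)
  rw [PySem.Dict.items_eq_map_keys _ hnd (PySem.Dict.empty, PySem.Dict.empty), List.map_map,
    keys_eq ud rom]
  apply List.map_congr_left
  intro pr _
  simp only [Function.comp]
  rw [getD_fold_rom, getD_fold_ud, PySem.Dict.getD_empty, side_items_eq ud pr, side_items_eq rom pr]
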